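-- pv_equiv track=rewrite | github.com/DevComplex/Python-Exercises | leetcode/sumZero.py | sumZero
-- ===== SOURCE A (Python) =====
-- def sumZero(n):
--     if n == 1:
--         return [0]
--
--     total = 0
--     output = []
--
--     for i in range(1, n):
--         output.append(i)
--         total += i
--
--     output.append(-total)
--
--     return output
-- ===== SOURCE B (Python) =====
-- def sumZero(n):
--     if n <= 1:
--         return [0]
--     return list(range(1, n)) + [-(n * (n - 1) // 2)]
-- ===== Notes on version B (the rewrite author's own statement) =====
-- stated objective: simpler
-- what changed: Replaces the append loop with a running total by a single range() list plus a closed-form (Gauss) negating tail element.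
import Mathlib
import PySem

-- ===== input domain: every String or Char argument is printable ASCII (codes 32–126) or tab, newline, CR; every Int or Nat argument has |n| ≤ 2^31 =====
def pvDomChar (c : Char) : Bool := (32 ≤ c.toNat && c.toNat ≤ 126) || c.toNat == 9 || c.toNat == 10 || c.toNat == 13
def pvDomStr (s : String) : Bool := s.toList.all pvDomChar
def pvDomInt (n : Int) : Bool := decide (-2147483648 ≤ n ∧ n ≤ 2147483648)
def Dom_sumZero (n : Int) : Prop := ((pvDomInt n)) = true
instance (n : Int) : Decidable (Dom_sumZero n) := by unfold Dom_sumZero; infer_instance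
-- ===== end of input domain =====

-- B replaces A's append loop with a running total by range(1,n) plus a closed-form Gauss tail; objective: simpler.

-- ===== PORT A =====
def sumZero (n : Int) : List Int :=
  if n == 1 then [0]
  else
    let st := (PySem.List.pyRange 1 n 1).foldl
      (fun (p : Int × List Int) i => (p.1 + i, p.2 ++ [i])) (0, [])
    st.2 ++ [-st.1]

-- ===== PORT B =====
def sumZero_alt (n : Int) : List Int :=
  if n ≤ 1 then [0]
  else PySem.List.pyRange 1 n 1 ++ [-(PySem.Int.floordiv (n * (n - 1)) 2)]

-- ===== PRECONDITION & SPEC =====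
def Spec_sumZero (n : Int) (out : List Int) : Prop := out = sumZero_alt n
instance (n : Int) (out : List Int) : Decidable (Spec_sumZero n out) := by unfold Spec_sumZero; infer_instance

-- ===== CLAIM (what is proved, stated in full; the proofs are below) =====
def Claim_equal_sumZero : Prop := ∀ (n : Int), Dom_sumZero n → Spec_sumZero n (sumZero n)

-- ===== LEMMAS AND PROOFS =====

-- A's loop accumulates the sum and the list of visited elements.
theorem sumZero_foldl_eq (l : List Int) (t : Int) (acc : List Int) :
    l.foldl (fun (p : Int × List Int) i => (p.1 + i, p.2 ++ [i])) (t, acc)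
      = (t + l.sum, acc ++ l) := by
  induction l generalizing t acc with
  | nil => simp
  | cons x xs ih => simp [ih, List.append_assoc]; ring

-- Gauss: twice the sum of 1..m equals m*(m+1).
theorem two_mul_sum_pyRange (m : Nat) :
    2 * (PySem.List.pyRange 1 ((m : Int) + 1) 1).sum = (m : Int) * ((m : Int) + 1) := by
  induction m with
  | zero => decide
  | succ k ih =>
    have h : (1 : Int) ≤ (k : Int) + 1 := by omega
    have : ((k + 1 : Nat) : Int) + 1 = ((k : Int) + 1) + 1 := by push_cast; ring
    rw [this, PySem.List.pyRange_one_succ_right h]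
    simp only [List.sum_append, List.sum_cons, List.sum_nil]
    push_cast
    push_cast at ih
    ring_nf
    ring_nf at ih
    omega

-- ===== VERDICT (by name: the statement is the Claim_ definition above) =====
theorem sumZero_spec : Claim_equal_sumZero := by
  intro n _
  unfold Spec_sumZero sumZero sumZero_alt
  by_cases h1 : n = 1
  · simp [h1]
  · by_cases h0 : n ≤ 1
    · have : PySem.List.pyRange 1 n 1 = [] := by
        simp [PySem.List.pyRange]; omega
      simp [h1, h0, this]
    · have hn : 2 ≤ n := by omega
      set m : Nat := (n - 1).toNat with hm
      have hn' : n = (m : Int) + 1 := by omega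
      have hsum : 2 * (PySem.List.pyRange 1 n 1).sum = n * (n - 1) := by
        rw [hn']; rw [two_mul_sum_pyRange m]; ring
      simp [h1, h0, sumZero_foldl_eq]
      omega
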